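-- pv_equiv track=rewrite | github.com/audi1712/saarthi2 | 5.py | get_utterance
-- ===== SOURCE A (Python) =====
-- def get_utterance(entities: list,utterence: str)->list:
--     if utterence.find("<>") == -1:
--         return [utterence]
--     else:
--         res = []
--         for i in entities:
--             x = utterence.find("<>")
--             res+=get_utterance([j for j in entities if j!=i],utterence[:x] + i + utterence[x+2:])
--         return res
-- ===== SOURCE B (Python) =====
-- def get_utterance(entities: list, utterence: str) -> list:
--     res = []
--     stack = [(entities, utterence)]
--     while stack:
--         ents, s = stack.pop()
--         x = s.find("<>")
--         if x == -1:
--             res.append(s)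
--         else:
--             children = [([j for j in ents if j != i], s[:x] + i + s[x+2:]) for i in ents]
--             stack.extend(reversed(children))
--     return res
-- ===== Notes on version B (the rewrite author's own statement) =====
-- stated objective: alternative
-- what changed: Replaced A's recursion with an explicit LIFO stack of (remaining_entities, partial_string) states, pushing children in reverse so the iterative DFS emits results in exactly A's order.
import Mathlib
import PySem

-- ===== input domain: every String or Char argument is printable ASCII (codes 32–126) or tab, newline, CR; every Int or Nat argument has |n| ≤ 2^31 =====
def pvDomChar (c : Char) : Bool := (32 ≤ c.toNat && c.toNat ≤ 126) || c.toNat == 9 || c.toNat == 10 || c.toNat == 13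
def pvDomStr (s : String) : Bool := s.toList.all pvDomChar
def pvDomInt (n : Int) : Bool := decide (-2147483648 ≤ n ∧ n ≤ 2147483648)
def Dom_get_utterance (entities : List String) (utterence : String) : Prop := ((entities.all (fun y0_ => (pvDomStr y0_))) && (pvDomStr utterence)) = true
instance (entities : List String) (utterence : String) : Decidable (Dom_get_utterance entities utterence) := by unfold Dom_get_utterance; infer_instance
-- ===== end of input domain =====

-- B replaces A's recursion by an explicit LIFO stack of (remaining_entities, partial_string)
-- states (children pushed in reverse, so the iterative DFS emits results in A's order);
-- objective: alternative decomposition, same cost.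

-- termination helper, cited by both ports' decreasing_by
theorem pv_filter_lt {l : List String} {x : String} (p : String → Bool)
    (hx : x ∈ l) (hp : p x = false) : (l.filter p).length < l.length := by
  rw [List.length_filter_lt_length_iff_exists]; exact ⟨x, hx, by simp [hp]⟩

-- ===== PORT A =====
-- literal transliteration of A: recursive DFS; `for i in entities` is a foldl over entities.attach
def get_utterance (entities : List String) (utterence : String) : List String :=
  if PySem.Str.find utterence "<>" == -1 then [utterence]
  else
    entities.attach.foldl (fun res i =>
      let x := PySem.Str.find utterence "<>"
      res ++ get_utterance (entities.filter (fun j => j != i.1))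
        (PySem.Str.slice utterence none (some x) ++ i.1 ++
         PySem.Str.slice utterence (some (x + 2)) none)) []
termination_by entities.length
decreasing_by
  simp only [List.unattach_filter, List.unattach_attach]
  exact pv_filter_lt (fun j => j != i.1) i.2 (by simp)

-- ===== PORT B =====
-- termination measure for Source B's while-loop: sum of (len(ents)+1)! over the stack
def pvMeasure (stack : List (List String × String)) : Nat :=
  (stack.map (fun p => (p.1.length + 1).factorial)).sum

theorem pv_measure_pop (p : List String × String) (rest : List (List String × String)) :
    pvMeasure rest < pvMeasure (p :: rest) := by
  simp only [pvMeasure, List.map_cons, List.sum_cons]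
  have := Nat.factorial_pos (p.1.length + 1)
  omega

theorem pv_measure_push (ents : List String) (s : String)
    (children : List (List String × String)) (rest : List (List String × String))
    (hlen : children.length = ents.length)
    (hch : ∀ c ∈ children, c.1.length < ents.length) :
    pvMeasure (children ++ rest) < pvMeasure ((ents, s) :: rest) := by
  have hb : ∀ m ∈ children.map (fun p => (p.1.length + 1).factorial), m ≤ ents.length.factorial := by
    intro m hm
    rcases List.mem_map.1 hm with ⟨c, hc, rfl⟩
    exact Nat.factorial_le (hch c hc)
  have hsum : (children.map (fun p => (p.1.length + 1).factorial)).sum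
      ≤ ents.length * ents.length.factorial := by
    have := List.sum_le_card_nsmul _ _ hb
    simpa [hlen] using this
  have hlt : ents.length * ents.length.factorial < (ents.length + 1).factorial := by
    rw [Nat.factorial_succ]
    have := Nat.factorial_pos ents.length
    nlinarith
  simp only [pvMeasure, List.map_append, List.sum_append, List.map_cons, List.sum_cons]
  omega

-- literal transliteration of Source B's while-loop (head of the Lean list = top of the stack;
-- Source B pushes the children reversed and pops from the end, so the next state popped is
-- children-in-entity-order first: exactly `children ++ rest` here)
def get_utterance_loop (res : List String) (stack : List (List String × String)) : List String :=
  match stack with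
  | [] => res
  | (ents, s) :: rest =>
    let x := PySem.Str.find s "<>"
    if x == -1 then get_utterance_loop (res ++ [s]) rest
    else
      let children := ents.attach.map (fun i =>
        (ents.filter (fun j => j != i.1),
         PySem.Str.slice s none (some x) ++ i.1 ++ PySem.Str.slice s (some (x + 2)) none))
      get_utterance_loop res (children ++ rest)
termination_by pvMeasure stack
decreasing_by
  · exact pv_measure_pop _ _
  · refine pv_measure_push ents s _ rest (by simp) ?_
    intro c hc
    rcases List.mem_map.1 hc with ⟨i, _, rfl⟩
    simp only [List.unattach_filter, List.unattach_attach]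
    exact pv_filter_lt (fun j => j != i.1) i.2 (by simp)

def get_utterance_alt (entities : List String) (utterence : String) : List String :=
  get_utterance_loop [] [(entities, utterence)]

-- ===== PRECONDITION & SPEC =====
def Spec_get_utterance (entities : List String) (utterence : String) (out : List String) : Prop := out = get_utterance_alt entities utterence
instance (entities : List String) (utterence : String) (out : List String) : Decidable (Spec_get_utterance entities utterence out) := by unfold Spec_get_utterance; infer_instance

-- ===== CLAIM (what is proved, stated in full; the proofs are below) =====
def Claim_equal_get_utterance : Prop := ∀ (entities : List String) (utterence : String), Dom_get_utterance entities utterence → Spec_get_utterance entities utterence (get_utterance entities utterence)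

-- ===== LEMMAS AND PROOFS =====

theorem foldl_append_flatMap {α β : Type} (f : α → List β) (l : List α) (a : List β) :
    l.foldl (fun r x => r ++ f x) a = a ++ l.flatMap f := by
  induction l generalizing a with
  | nil => simp
  | cons x t ih => simp [List.foldl, ih, List.flatMap_cons, List.append_assoc]

-- A's recursive step, written as a flatMap over the entity list
theorem get_utterance_eq (ents : List String) (s : String) :
    get_utterance ents s =
      if PySem.Str.find s "<>" == -1 then [s]
      else ents.flatMap (fun i =>
        get_utterance (ents.filter (fun j => j != i))
          (PySem.Str.slice s none (some (PySem.Str.find s "<>")) ++ i ++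
           PySem.Str.slice s (some (PySem.Str.find s "<>" + 2)) none)) := by
  rw [get_utterance.eq_def]
  split
  · rfl
  · rw [foldl_append_flatMap]
    simp [List.flatMap]

-- the loop invariant: the stack holds the pending subproblems, in emission order
theorem loop_invariant_aux : ∀ (n : Nat) (stack : List (List String × String)) (res : List String),
    pvMeasure stack ≤ n →
    get_utterance_loop res stack = res ++ stack.flatMap (fun p => get_utterance p.1 p.2) := by
  intro n
  induction n with
  | zero =>
    intro stack res h
    cases stack with
    | nil => simp [get_utterance_loop]
    | cons p rest => exfalso; have := pv_measure_pop p rest; omega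
  | succ n ih =>
    intro stack res h
    cases stack with
    | nil => simp [get_utterance_loop]
    | cons p rest =>
      obtain ⟨ents, s⟩ := p
      rw [get_utterance_loop.eq_def]
      simp only
      by_cases hx : (PySem.Str.find s "<>" == -1) = true
      · rw [if_pos hx, ih rest _ (by have := pv_measure_pop (ents, s) rest; omega)]
        have h1 : get_utterance ents s = [s] := by rw [get_utterance_eq, if_pos hx]
        simp [h1, List.append_assoc]
      · rw [if_neg hx]
        have hch : ∀ c ∈ (ents.attach.map (fun i =>
            (ents.filter (fun j => j != i.1),
             PySem.Str.slice s none (some (PySem.Str.find s "<>")) ++ i.1 ++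
             PySem.Str.slice s (some (PySem.Str.find s "<>" + 2)) none))), c.1.length < ents.length := by
          intro c hc
          rcases List.mem_map.1 hc with ⟨i, _, rfl⟩
          exact pv_filter_lt (fun j => j != i.1) i.2 (by simp)
        have hmeas : pvMeasure ((ents.attach.map (fun i =>
            (ents.filter (fun j => j != i.1),
             PySem.Str.slice s none (some (PySem.Str.find s "<>")) ++ i.1 ++
             PySem.Str.slice s (some (PySem.Str.find s "<>" + 2)) none))) ++ rest) ≤ n := by
          have hlt := pv_measure_push ents s _ rest (by simp) hch
          omega
        rw [ih _ res hmeas]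
        congr 1
        rw [List.flatMap_append, List.flatMap_cons]
        congr 1
        rw [get_utterance_eq ents s, if_neg hx]
        simp [List.flatMap, Function.comp_def]

theorem loop_invariant (res : List String) (stack : List (List String × String)) :
    get_utterance_loop res stack = res ++ stack.flatMap (fun p => get_utterance p.1 p.2) :=
  loop_invariant_aux (pvMeasure stack) stack res (Nat.le_refl _)

-- ===== VERDICT (by name: the statement is the Claim_ definition above) =====
theorem get_utterance_spec : Claim_equal_get_utterance := by
  intro entities utterence _
  unfold Spec_get_utterance get_utterance_alt
  rw [loop_invariant]
  simp
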